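-- pv_equiv track=rewrite | github.com/levycshl/bag-pipe | src/bag_pipe/tags.py | split_tag
-- ===== SOURCE A (Python) =====
-- from typing import Dict, List, Set, Tuple
--
-- def split_tag(tag: str, k: int) -> List[str]:
--     """
--     Split the tag into (k+1) non-overlapping substrings.
--     Any two tags with Hamming ≤ k are guaranteed to share at least
--     one identical block.
--     """
--     n_blocks = k + 1
--     base_len, extra = divmod(len(tag), n_blocks)
--     parts, start = [], 0
--     for i in range(n_blocks):
--         end = start + base_len + (1 if i < extra else 0)
--         parts.append(tag[start:end])
--         start = end
--     return parts
-- ===== SOURCE B (Python) =====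
-- def split_tag(tag: str, k: int):
--     n_blocks = k + 1
--     base_len, extra = divmod(len(tag), n_blocks)
--     return [tag[i * base_len + min(i, extra):(i + 1) * base_len + min(i + 1, extra)]
--             for i in range(n_blocks)]
-- ===== Notes on version B (the rewrite author's own statement) =====
-- stated objective: alternative
-- what changed: Replaces the loop that threads a running start cursor with a comprehension that computes each block's boundaries independently in closed form (start = i*base_len + min(i, extra)).
import Mathlib
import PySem

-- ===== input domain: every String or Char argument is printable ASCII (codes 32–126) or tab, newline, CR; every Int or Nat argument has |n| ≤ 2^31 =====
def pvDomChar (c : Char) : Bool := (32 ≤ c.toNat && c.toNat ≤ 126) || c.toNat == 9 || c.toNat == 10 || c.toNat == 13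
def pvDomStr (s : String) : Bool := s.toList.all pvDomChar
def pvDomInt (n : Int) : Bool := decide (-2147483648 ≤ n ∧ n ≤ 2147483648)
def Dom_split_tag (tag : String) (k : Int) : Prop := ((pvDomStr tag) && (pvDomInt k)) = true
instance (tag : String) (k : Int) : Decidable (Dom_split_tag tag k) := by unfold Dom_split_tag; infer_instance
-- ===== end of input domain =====

-- B replaces A's running start-cursor loop with a comprehension computing each block's
-- boundaries independently in closed form; same cost, alternative decomposition.

-- ===== PORT A =====
def split_tag (tag : String) (k : Int) : List String :=
  let nBlocks := k + 1
  let baseLen := PySem.Int.floordiv (PySem.Str.len tag) nBlocks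
  let extra := PySem.Int.mod (PySem.Str.len tag) nBlocks
  let res := (PySem.List.pyRange 0 nBlocks 1).foldl
    (fun (st : List String × Int) i =>
      let e := st.2 + baseLen + (if i < extra then (1 : Int) else 0)
      (st.1 ++ [PySem.Str.slice tag (some st.2) (some e)], e))
    ([], 0)
  res.1

-- ===== PORT B =====
def split_tag_alt (tag : String) (k : Int) : List String :=
  let nBlocks := k + 1
  let baseLen := PySem.Int.floordiv (PySem.Str.len tag) nBlocks
  let extra := PySem.Int.mod (PySem.Str.len tag) nBlocks
  (PySem.List.pyRange 0 nBlocks 1).map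
    (fun i => PySem.Str.slice tag (some (i * baseLen + min i extra))
                                  (some ((i + 1) * baseLen + min (i + 1) extra)))

-- ===== PRECONDITION & SPEC =====
-- Python's divmod raises ZeroDivisionError when k + 1 = 0 (in both A and B): k = -1 is excluded.
def Pre_split_tag (tag : String) (k : Int) : Prop := k ≠ -1
instance (tag : String) (k : Int) : Decidable (Pre_split_tag tag k) := by unfold Pre_split_tag; infer_instance
def pvWitness_split_tag : String × Int := ("abcdefg", 2)
def Spec_split_tag (tag : String) (k : Int) (out : List String) : Prop := out = split_tag_alt tag k
instance (tag : String) (k : Int) (out : List String) : Decidable (Spec_split_tag tag k out) := by unfold Spec_split_tag; infer_instance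

-- ===== CLAIM (what is proved, stated in full; the proofs are below) =====
def Claim_equal_split_tag : Prop := ∀ (tag : String) (k : Int), Dom_split_tag tag k → Pre_split_tag tag k → Spec_split_tag tag k (split_tag tag k)

-- ===== LEMMAS AND PROOFS =====

-- the cursor after j iterations equals B's closed-form start for block j
lemma split_tag_loop_eq (tag : String) (b e : Int) :
    ∀ (m : Nat) (j n : Int), 0 ≤ j → n - j = (m : Int) →
    ∀ (acc : List String) (s : Int), s = j * b + min j e →
    ((PySem.List.pyRange j n 1).foldl
      (fun (st : List String × Int) i =>
        let en := st.2 + b + (if i < e then (1 : Int) else 0)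
        (st.1 ++ [PySem.Str.slice tag (some st.2) (some en)], en))
      (acc, s)).1
    = acc ++ (PySem.List.pyRange j n 1).map
        (fun i => PySem.Str.slice tag (some (i * b + min i e))
                                      (some ((i + 1) * b + min (i + 1) e))) := by
  intro m
  induction m with
  | zero =>
    intro j n hj hm acc s hs
    rw [PySem.List.pyRange_one_eq_nil (by omega)]
    simp
  | succ m ih =>
    intro j n hj hm acc s hs
    rw [PySem.List.pyRange_one_cons (by omega)]
    simp only [List.foldl_cons, List.map_cons]
    have hb : (j + 1) * b = j * b + b := by ring
    have hmin : s + b + (if j < e then (1 : Int) else 0)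
        = (j + 1) * b + min (j + 1) e := by
      rcases lt_or_ge j e with h | h <;> simp [h, hb] <;> omega
    rw [hmin, hs]
    have := ih (j + 1) n (by omega) (by omega)
      (acc ++ [PySem.Str.slice tag (some (j * b + min j e)) (some ((j + 1) * b + min (j + 1) e))])
      ((j + 1) * b + min (j + 1) e) rfl
    simpa using this

-- ===== VERDICT (by name: the statement is the Claim_ definition above) =====
theorem split_tag_spec : Claim_equal_split_tag := by
  intro tag k _ hk
  have hk' : k ≠ -1 := hk
  show split_tag tag k = split_tag_alt tag k
  simp only [split_tag, split_tag_alt]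
  rcases lt_or_ge (k + 1) 0 with h | h
  · rw [PySem.List.pyRange_one_eq_nil (by omega)]
    simp
  · have hpos : 0 < k + 1 := by omega
    have hmod : 0 ≤ PySem.Int.mod (PySem.Str.len tag) (k + 1) := PySem.Int.mod_nonneg _ hpos
    exact split_tag_loop_eq tag _ _ (k + 1).toNat 0 (k + 1) le_rfl (by omega) [] 0
      (by rw [zero_mul, zero_add]; omega)
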